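-- pv_equiv track=rewrite | github.com/Defelo/AdventOfCode | Python/2018/05.py | react
-- ===== SOURCE A (Python) =====
-- def react(poly, wo):
--     stack = []
--     for c in poly:
--         if c.lower() == wo.lower():
--             continue
--         if stack and stack[-1].lower() == c.lower() and stack[-1].islower() != c.islower():
--             stack.pop()
--         else:
--             stack.append(c)
--     return len(stack)
-- ===== SOURCE B (Python) =====
-- def react(poly, wo):
--     # strip out the ignored unit first, then repeatedly delete adjacent
--     # reacting pairs in place (fixed-point reduction), resuming the scan
--     # one position back after each deletion
--     s = [c for c in poly if c.lower() != wo.lower()]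
--     i = 0
--     while i + 1 < len(s):
--         a, b = s[i], s[i + 1]
--         if a.lower() == b.lower() and a.islower() != b.islower():
--             del s[i:i + 2]
--             if i > 0:
--                 i -= 1
--         else:
--             i += 1
--     return len(s)
-- ===== Notes on version B (the rewrite author's own statement) =====
-- stated objective: alternative
-- what changed: Replaces the single-pass stack with a pre-filter followed by an in-place fixed-point reduction that scans for the first adjacent reacting pair, deletes it and backs up one position, returning the length of the irreducible residue.
import Mathlib
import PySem

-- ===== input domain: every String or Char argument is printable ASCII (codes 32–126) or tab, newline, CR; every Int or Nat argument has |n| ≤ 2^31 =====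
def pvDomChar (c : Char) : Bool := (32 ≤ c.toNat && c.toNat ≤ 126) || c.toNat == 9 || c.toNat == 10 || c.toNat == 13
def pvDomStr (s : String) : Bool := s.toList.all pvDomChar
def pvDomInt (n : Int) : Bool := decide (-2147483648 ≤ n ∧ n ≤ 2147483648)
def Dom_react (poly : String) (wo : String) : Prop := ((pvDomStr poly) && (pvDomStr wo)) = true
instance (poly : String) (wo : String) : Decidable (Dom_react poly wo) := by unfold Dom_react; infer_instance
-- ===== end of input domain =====

-- B replaces A's single-pass stack by an in-place fixed-point pair-deletion scan (alternative
-- decomposition, no speed claim); equal return value on every input, no observable side effects.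

-- ===== PORT A =====
-- A's stack loop: skip units equal (case-insensitively) to wo, pop on a reacting pair, else push.
-- Python's 1-char strings are Chars here; `x.lower() == y.lower()` on 1-char strings is
-- PySem.Chars.lower [x] == PySem.Chars.lower [y]; `stack[-1]` is PySem.List.pyGet? stack (-1).
def react (poly : String) (wo : String) : Int :=
  ((poly.toList.foldl (fun stack c =>
      if PySem.Chars.lower [c] == PySem.Chars.lower wo.toList then stack
      else
        match PySem.List.pyGet? stack (-1) with
        | some t =>
          if PySem.Chars.lower [t] == PySem.Chars.lower [c]
              && (PySem.Chars.islower t != PySem.Chars.islower c) then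
            stack.dropLast
          else stack ++ [c]
        | none => stack ++ [c]) ([] : List Char)).length : Int)

-- ===== PORT B =====
-- `a.lower() == b.lower() and a.islower() != b.islower()` on 1-char strings
def reactPair (a b : Char) : Bool :=
  PySem.Chars.lower [a] == PySem.Chars.lower [b]
    && (PySem.Chars.islower a != PySem.Chars.islower b)

-- Source B's while loop: scan for the first adjacent reacting pair, delete it in place
-- (`del s[i:i+2]` = take i ++ drop (i+2)) and step back one position (Nat `i - 1` is
-- Python's `if i > 0: i -= 1`), else advance; return len(s) when no pair is left.
-- fuel is only a structural termination bound: the loop's measure (s.length - i) + s.length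
-- strictly decreases, so with fuel > that measure the 0-case is never reached
def reactGo (fuel : Nat) (s : List Char) (i : Nat) : Int :=
  match fuel with
  | 0 => (s.length : Int)
  | fuel + 1 =>
    if h : i + 1 < s.length then
      if reactPair (s[i]'(by omega)) (s[i+1]'h) then
        reactGo fuel (s.take i ++ s.drop (i+2)) (i - 1)
      else
        reactGo fuel s (i + 1)
    else
      (s.length : Int)

def react_alt (poly : String) (wo : String) : Int :=
  let s := poly.toList.filter
    (fun c => !(PySem.Chars.lower [c] == PySem.Chars.lower wo.toList))
  reactGo (2 * s.length + 1) s 0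

-- ===== PRECONDITION & SPEC =====
def Spec_react (poly : String) (wo : String) (out : Int) : Prop := out = react_alt poly wo
instance (poly : String) (wo : String) (out : Int) : Decidable (Spec_react poly wo out) := by unfold Spec_react; infer_instance

-- ===== CLAIM (what is proved, stated in full; the proofs are below) =====
def Claim_equal_react : Prop := ∀ (poly : String) (wo : String), Dom_react poly wo → Spec_react poly wo (react poly wo)

-- ===== LEMMAS AND PROOFS =====

-- the unit removed by the pre-filter / A's `continue`
def skipC (wo : String) (c : Char) : Bool :=
  PySem.Chars.lower [c] == PySem.Chars.lower wo.toList

-- A's stack update for a kept unit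
def stepR (stack : List Char) (c : Char) : List Char :=
  match PySem.List.pyGet? stack (-1) with
  | some t => if reactPair t c then stack.dropLast else stack ++ [c]
  | none => stack ++ [c]

-- irreducible: no adjacent reacting pair
def Irr (s : List Char) : Prop := List.IsChain (fun a b => reactPair a b = false) s

theorem react_eq_foldl (poly wo : String) :
    react poly wo =
      ((poly.toList.foldl (fun s c => if skipC wo c then s else stepR s c)
        ([] : List Char)).length : Int) := rfl

theorem reacts_iff (a b : Char) :
    reactPair a b = true ↔
      PySem.Chars.lowerChar a = PySem.Chars.lowerChar b
        ∧ PySem.Chars.islower a ≠ PySem.Chars.islower b := by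
  simp [reactPair, PySem.Chars.lower, bne_iff_ne]

theorem reacts_symm (a b : Char) : reactPair a b = reactPair b a := by
  rcases h : reactPair b a with _ | _
  · rcases h' : reactPair a b with _ | _
    · rfl
    · rw [reacts_iff] at h'
      exact absurd ((reacts_iff b a).mpr ⟨h'.1.symm, Ne.symm h'.2⟩) (by simp [h])
  · rw [reacts_iff] at h
    exact (reacts_iff a b).mpr ⟨h.1.symm, Ne.symm h.2⟩

theorem islower_toNat (c : Char) :
    PySem.Chars.islower c = true ↔ 97 ≤ c.toNat ∧ c.toNat ≤ 122 := by
  simp only [PySem.Chars.islower, Bool.and_eq_true, decide_eq_true_eq, Char.le_def,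
    UInt32.le_iff_toNat_le]
  exact Iff.rfl

theorem isupper_toNat (c : Char) :
    PySem.Chars.isupper c = true ↔ 65 ≤ c.toNat ∧ c.toNat ≤ 90 := by
  simp only [PySem.Chars.isupper, Bool.and_eq_true, decide_eq_true_eq, Char.le_def,
    UInt32.le_iff_toNat_le]
  exact Iff.rfl

theorem lowerChar_of_not_upper (c : Char) (h : PySem.Chars.isupper c = false) :
    PySem.Chars.lowerChar c = c := by
  simp [PySem.Chars.lowerChar, h]

theorem lowerChar_of_islower (c : Char) (h : PySem.Chars.islower c = true) :
    PySem.Chars.lowerChar c = c := by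
  apply lowerChar_of_not_upper
  rw [islower_toNat] at h
  rcases hu : PySem.Chars.isupper c with _ | _
  · rfl
  · rw [isupper_toNat] at hu; omega

theorem toNat_lowerChar_of_upper (c : Char) (h : PySem.Chars.isupper c = true) :
    (PySem.Chars.lowerChar c).toNat = c.toNat + 32 := by
  rw [isupper_toNat] at h
  simp only [PySem.Chars.lowerChar]
  rw [if_pos (by rw [isupper_toNat]; omega)]
  rw [Char.toNat_ofNat, if_pos]
  exact Or.inl (by omega)

theorem char_toNat_inj (a b : Char) (h : a.toNat = b.toNat) : a = b := by
  apply Char.ext; unfold Char.toNat at h; exact UInt32.toNat_inj.mp h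

theorem reacts_unique (x y z : Char) (h1 : reactPair x y = true)
    (h2 : reactPair x z = true) : y = z := by
  rw [reacts_iff] at h1 h2
  obtain ⟨e1, n1⟩ := h1
  obtain ⟨e2, n2⟩ := h2
  rcases hx : PySem.Chars.islower x with _ | _
  · -- x not lowercase: y, z are lowercase, hence fixed by lowerChar
    have hy : PySem.Chars.islower y = true := by
      rcases h : PySem.Chars.islower y with _ | _
      · exact absurd (hx.trans h.symm) n1
      · rfl
    have hz : PySem.Chars.islower z = true := by
      rcases h : PySem.Chars.islower z with _ | _
      · exact absurd (hx.trans h.symm) n2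
      · rfl
    have := (lowerChar_of_islower y hy).symm.trans (e1.symm.trans (e2.trans (lowerChar_of_islower z hz)))
    exact this
  · -- x lowercase: y, z are its upper-case partner, determined by toNat
    have hy : PySem.Chars.islower y = false := by
      rcases h : PySem.Chars.islower y with _ | _
      · rfl
      · exact absurd (hx.trans h.symm) n1
    have hz : PySem.Chars.islower z = false := by
      rcases h : PySem.Chars.islower z with _ | _
      · rfl
      · exact absurd (hx.trans h.symm) n2
    have hlx := lowerChar_of_islower x hx
    have ey : PySem.Chars.lowerChar y = x := e1.symm.trans hlx
    have ez : PySem.Chars.lowerChar z = x := e2.symm.trans hlx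
    have huy : PySem.Chars.isupper y = true := by
      rcases h : PySem.Chars.isupper y with _ | _
      · exfalso
        have := (lowerChar_of_not_upper y h).symm.trans ey
        rw [this] at hy
        rw [hy] at hx
        exact Bool.false_ne_true hx
      · rfl
    have huz : PySem.Chars.isupper z = true := by
      rcases h : PySem.Chars.isupper z with _ | _
      · exfalso
        have := (lowerChar_of_not_upper z h).symm.trans ez
        rw [this] at hz
        rw [hz] at hx
        exact Bool.false_ne_true hx
      · rfl
    apply char_toNat_inj
    have ty := toNat_lowerChar_of_upper y huy
    have tz := toNat_lowerChar_of_upper z huz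
    rw [ey] at ty
    rw [ez] at tz
    omega

theorem pyGet_neg_one (s : List Char) : PySem.List.pyGet? s (-1) = s.getLast? := by
  simp [pysem]

theorem stepR_nil (c : Char) : stepR [] c = [c] := rfl

theorem stepR_concat (s : List Char) (t c : Char) :
    stepR (s ++ [t]) c = if reactPair t c then s else s ++ [t] ++ [c] := by
  rw [stepR, pyGet_neg_one]
  simp

theorem Irr_stepR (s : List Char) (c : Char) (h : Irr s) : Irr (stepR s c) := by
  induction s using List.reverseRecOn with
  | nil => simp [Irr, stepR_nil]
  | append_singleton s t _ =>
    rw [stepR_concat]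
    rcases hr : reactPair t c with _ | _
    · rw [if_neg (by simp)]
      unfold Irr at h ⊢
      rw [List.isChain_append]
      refine ⟨h, by simp, ?_⟩
      intro x hx y hy
      simp at hx hy
      subst hx
      subst hy
      exact hr
    · rw [if_pos rfl]
      exact h.prefix (List.prefix_append s [t])

theorem Irr_foldl (l : List Char) (a : List Char) (ha : Irr a) :
    Irr (l.foldl stepR a) := by
  induction l generalizing a with
  | nil => exact ha
  | cons c l ih => exact ih _ (Irr_stepR _ _ ha)

theorem stepR_stepR (s : List Char) (x y : Char) (hs : Irr s)
    (hxy : reactPair x y = true) : stepR (stepR s x) y = s := by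
  induction s using List.reverseRecOn with
  | nil =>
    rw [stepR_nil]
    have : ([] : List Char) ++ [x] = [x] := rfl
    rw [← this, stepR_concat, if_pos hxy]
  | append_singleton s' t _ =>
    rw [stepR_concat]
    rcases hr : reactPair t x with _ | _
    · -- top of stack does not react with x: push x, then y pops it
      rw [if_neg (by simp)]
      rw [stepR_concat, if_pos hxy]
    · -- top t reacts with x; then t = y (unique partner) and y is pushed back
      rw [if_pos rfl]
      have hty : t = y := by
        have hxt : reactPair x t = true := by rw [reacts_symm]; exact hr
        exact reacts_unique x t y hxt hxy
      subst hty
      cases s' using List.reverseRecOn with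
      | nil => rfl
      | append_singleton s'' u =>
        have hut : reactPair u t = false := by
          unfold Irr at hs
          rw [List.isChain_append] at hs
          exact hs.2.2 u (by simp) t (by simp)
        rw [stepR_concat, if_neg (by simp [hut])]

theorem foldl_del (a : List Char) (x y : Char) (v : List Char) (ha : Irr a)
    (hxy : reactPair x y = true) :
    (x :: y :: v).foldl stepR a = v.foldl stepR a := by
  simp only [List.foldl_cons]
  rw [stepR_stepR a x y ha hxy]

theorem NF_fix (s : List Char) (h : Irr s) : s.foldl stepR [] = s := by
  induction s using List.reverseRecOn with
  | nil => rfl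
  | append_singleton s t ih =>
    rw [List.foldl_append]
    rw [ih (h.prefix (List.prefix_append s [t]))]
    simp only [List.foldl_cons, List.foldl_nil]
    cases s using List.reverseRecOn with
    | nil => rfl
    | append_singleton s' u =>
      have hut : reactPair u t = false := by
        unfold Irr at h
        rw [List.isChain_append] at h
        exact h.2.2 u (by simp) t (by simp)
      rw [stepR_concat, if_neg (by simp [hut])]

theorem go_spec (fuel : Nat) (s : List Char) (i : Nat)
    (hfuel : (s.length - i) + s.length < fuel)
    (hinv : ∀ j (hj : j + 1 < s.length), j < i →
      reactPair (s[j]'(by omega)) (s[j+1]'hj) = false) :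
    reactGo fuel s i = ((s.foldl stepR []).length : Int) := by
  induction fuel generalizing s i with
  | zero => omega
  | succ fuel ih =>
    rw [reactGo]
    by_cases hlen : i + 1 < s.length
    · rw [dif_pos hlen]
      split
      next hpair =>
        have hdecomp : s = s.take i ++ s[i] :: s[i+1] :: s.drop (i+2) := by
          conv_lhs => rw [← List.take_append_drop i s]
          congr 1
          rw [List.drop_eq_getElem_cons (by omega : i < s.length)]
          congr 1
          exact List.drop_eq_getElem_cons hlen
        have key : (s.take i ++ s.drop (i+2)).foldl stepR [] = s.foldl stepR [] := by
          conv_rhs => rw [hdecomp]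
          rw [List.foldl_append, List.foldl_append]
          exact (foldl_del _ _ _ _ (Irr_foldl _ _ (by simp [Irr])) hpair).symm
        have hlen2 : (s.take i ++ s.drop (i+2)).length = s.length - 2 := by
          simp only [List.length_append, List.length_take, List.length_drop]; omega
        rw [ih _ _ (by omega) ?_, key]
        intro j hj hji
        have hjlt : j + 1 < i := by omega
        have e1 : (s.take i ++ s.drop (i+2))[j]'(by omega) = s[j]'(by omega) := by
          rw [List.getElem_append_left (by simp; omega)]
          exact List.getElem_take
        have e2 : (s.take i ++ s.drop (i+2))[j+1]'hj = s[j+1]'(by omega) := by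
          rw [List.getElem_append_left (by simp; omega)]
          exact List.getElem_take
        rw [e1, e2]
        exact hinv j (by omega) (by omega)
      next hpair =>
        apply ih _ _ (by omega)
        intro j hj hji
        rcases Nat.lt_or_ge j i with hlt | hge
        · exact hinv j hj hlt
        · have : j = i := by omega
          subst this
          simpa using hpair
    · rw [dif_neg hlen]
      have hirr : Irr s := by
        unfold Irr
        rw [List.isChain_iff_getElem]
        intro j hj
        exact hinv j hj (by omega)
      rw [NF_fix s hirr]

-- ===== VERDICT (by name: the statement is the Claim_ definition above) =====
theorem react_spec : Claim_equal_react := by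
  intro poly wo _
  unfold Spec_react
  rw [react_eq_foldl]
  have halt : react_alt poly wo =
      reactGo (2 * (poly.toList.filter
        (fun c => !(PySem.Chars.lower [c] == PySem.Chars.lower wo.toList))).length + 1)
        (poly.toList.filter
          (fun c => !(PySem.Chars.lower [c] == PySem.Chars.lower wo.toList))) 0 := rfl
  rw [halt]
  rw [go_spec _ _ 0 (by omega) (by intro j hj hji; omega)]
  rw [List.foldl_filter]
  have hfun : (fun (x : List Char) (y : Char) =>
      if (!(PySem.Chars.lower [y] == PySem.Chars.lower wo.toList)) = true then stepR x y else x)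
      = (fun s c => if skipC wo c then s else stepR s c) := by
    funext x y
    rcases h : PySem.Chars.lower [y] == PySem.Chars.lower wo.toList with _ | _ <;>
      simp [skipC, h]
  rw [hfun]
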